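-- pv_equiv track=rewrite | github.com/Hoowdy/Practice-Calculator | Model/prc.py | separate_with_spaces
-- ===== SOURCE A (Python) =====
-- def separate_with_spaces(expr):
--     """
--     Розділяє оператори пробілами, крім випадків, коли оператор '-' використовується для позначення від'ємного числа.
--     """
--     operators = ['+', '-', '*', '/', '^']
--     result = ""
--     i = 0
--     while i < len(expr):
--         if expr[i] in operators:
--             # Перевіряємо чи є '-'
--             if expr[i] == '-':
--                 # Якщо перед '-' нічого немає або є оператор чи відкрита дужка, то це від'ємне число
--                 if i == 0 or expr[i - 1] in operators + ['(', ' ']: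
--                     result += expr[i]
--                 else:
--                     result += f" {expr[i]} "
--             else:
--                 result += f" {expr[i]} "
--         else:
--             result += expr[i]
--         i += 1
--     return result
-- ===== SOURCE B (Python) =====
-- def separate_with_spaces(expr):
--     """Staged: split on '-', space the other operators per segment with str.replace,
--     then rejoin, rendering each '-' as unary or binary from the end of the preceding segment."""
--     parts = expr.split('-')
--     segs = []
--     for p in parts:
--         for c in '+*/^':
--             p = p.replace(c, f' {c} ')
--         segs.append(p)
--     out = [segs[0]]
--     for prev, seg in zip(parts, segs[1:]):
--         out.append('-' if not prev or prev[-1] in '+*/^( ' else ' - ')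
--         out.append(seg)
--     return ''.join(out)
-- ===== Notes on version B (the rewrite author's own statement) =====
-- stated objective: faster
-- what changed: Replaces A's per-character while loop with a staged pipeline: split the string on '-', space the other four operators inside each segment with str.replace, then rejoin deciding unary vs binary minus from the last character of the preceding segment.
import Mathlib
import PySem

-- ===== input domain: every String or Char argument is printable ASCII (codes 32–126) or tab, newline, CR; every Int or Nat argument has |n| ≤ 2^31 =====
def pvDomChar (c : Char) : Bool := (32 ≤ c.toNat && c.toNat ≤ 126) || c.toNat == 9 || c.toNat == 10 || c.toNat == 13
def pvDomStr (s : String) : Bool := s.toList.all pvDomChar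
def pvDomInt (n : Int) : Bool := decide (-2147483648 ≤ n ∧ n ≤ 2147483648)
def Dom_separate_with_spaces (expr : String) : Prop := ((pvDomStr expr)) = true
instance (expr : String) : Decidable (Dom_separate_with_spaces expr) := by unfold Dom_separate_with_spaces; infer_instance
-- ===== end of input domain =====

-- B replaces A's per-character while loop by a staged pipeline (split on '-', space the other
-- operators per segment via replace, rejoin with the unary/binary decision from the previous
-- segment's last character); measured faster by a constant factor; same return value (proved below).

-- ===== PORT A =====
-- operators = ['+', '-', '*', '/', '^']
def pvOpsA : List Char := ['+', '-', '*', '/', '^']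

-- the while loop: i runs over the indices of expr, result accumulates (strings kept as List Char)
def sepALoop (cs : List Char) (i : Nat) (result : List Char) : List Char :=
  if h : i < cs.length then
    let c := cs[i]
    let result' :=
      if c ∈ pvOpsA then
        if c = '-' then
          if i = 0 ∨ cs[i-1]! ∈ pvOpsA ++ ['(', ' '] then result ++ [c]
          else result ++ [' ', c, ' ']
        else result ++ [' ', c, ' ']
      else result ++ [c]
    sepALoop cs (i + 1) result'
  else result
termination_by cs.length - i

def separate_with_spaces (expr : String) : String :=
  String.ofList (sepALoop expr.toList 0 [])

-- ===== PORT B =====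
-- inner loop: for c in '+*/^': p = p.replace(c, f' {c} ')
def pvSpaceOthers (p : List Char) : List Char :=
  (['+', '*', '/', '^'] : List Char).foldl
    (fun p c => PySem.Chars.replace p [c] [' ', c, ' ']) p

-- '-' if not prev or prev[-1] in '+*/^( ' else ' - '
def pvMinusTok (prev : List Char) : List Char :=
  if prev.isEmpty || (match prev.getLast? with
      | none => false
      | some c => c ∈ (['+', '*', '/', '^', '(', ' '] : List Char)) then ['-']
  else [' ', '-', ' ']

-- parts = expr.split('-'); segs = [spaced parts]; out = [segs[0]] then pairs; ''.join(out)
-- (str.split always returns a nonempty list, so segs[0] never raises; head! is exact here)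
def separate_with_spaces_alt (expr : String) : String :=
  let cs := expr.toList
  let parts := PySem.Chars.splitOn cs ['-']
  let segs := parts.map pvSpaceOthers
  let out := (parts.zip (segs.drop 1)).foldl
    (fun out pc => out ++ [pvMinusTok pc.1, pc.2]) [segs.head!]
  String.ofList (PySem.Chars.join [] out)

-- ===== PRECONDITION & SPEC =====
def Spec_separate_with_spaces (expr : String) (out : String) : Prop := out = separate_with_spaces_alt expr
instance (expr : String) (out : String) : Decidable (Spec_separate_with_spaces expr out) := by unfold Spec_separate_with_spaces; infer_instance

-- ===== CLAIM (what is proved, stated in full; the proofs are below) =====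
def Claim_equal_separate_with_spaces : Prop := ∀ (expr : String), Dom_separate_with_spaces expr → Spec_separate_with_spaces expr (separate_with_spaces expr)

-- ===== LEMMAS AND PROOFS =====

-- the common spec: per-character spacing with the previous character as context
def pvUnaryCtx : Option Char → Bool
  | none => true
  | some p => p ∈ (['+', '-', '*', '/', '^', '(', ' '] : List Char)

def pvSpaced (prev : Option Char) (c : Char) : List Char :=
  if c ∈ (['+', '-', '*', '/', '^'] : List Char) ∧ ¬(c = '-' ∧ pvUnaryCtx prev = true) then
    [' ', c, ' ']
  else [c]

def pvS : Option Char → List Char → List Char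
  | _, [] => []
  | prev, c :: rest => pvSpaced prev c ++ pvS (some c) rest

def gOth (c : Char) : List Char :=
  if c ∈ (['+', '*', '/', '^'] : List Char) then [' ', c, ' '] else [c]

def splitD : List Char → List (List Char)
  | [] => [[]]
  | c :: rest => if c = '-' then [] :: splitD rest else (splitD rest).modifyHead (c :: ·)

theorem splitD_cons_minus (rest : List Char) : splitD ('-' :: rest) = [] :: splitD rest := by
  simp [splitD]

theorem splitD_cons_other {c : Char} (hc : c ≠ '-') (rest : List Char) :
    splitD (c :: rest) = (splitD rest).modifyHead (c :: ·) := by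
  simp [splitD, hc]

theorem splitD_ne_nil (cs : List Char) : splitD cs ≠ [] := by
  cases cs with
  | nil => simp [splitD]
  | cons c rest =>
    simp only [splitD]
    split
    · simp
    · have := splitD_ne_nil rest
      cases h : splitD rest with
      | nil => exact absurd h this
      | cons q r => simp [List.modifyHead]

theorem modifyHead_nil_append (l : List (List Char)) :
    l.modifyHead (fun x => ([] : List Char) ++ x) = l := by
  cases l <;> simp [List.modifyHead]

theorem splitOn_go_eq (fuel : Nat) (l cur : List Char) (acc : List (List Char))
    (h : l.length < fuel) :
    PySem.Chars.splitOn.go ['-'] fuel l cur acc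
      = acc.reverse ++ (splitD l).modifyHead (cur.reverse ++ ·) := by
  match fuel, l with
  | 0, l => omega
  | fuel + 1, [] => simp [PySem.Chars.splitOn.go, splitD, List.modifyHead]
  | fuel + 1, c :: rest =>
    rw [PySem.Chars.splitOn.go]
    by_cases hc : c = '-'
    · subst hc
      rw [if_pos (by simp [List.isPrefixOf])]
      rw [show List.drop ['-'].length ('-' :: rest) = rest from rfl]
      rw [splitOn_go_eq fuel rest [] (cur.reverse :: acc) (by simp at h ⊢; omega)]
      rw [splitD_cons_minus]
      cases splitD rest <;> simp [List.modifyHead]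
    · rw [if_neg (by simp [List.isPrefixOf]; exact fun h' => hc h'.symm)]
      rw [splitOn_go_eq fuel rest (c :: cur) acc (by simp at h ⊢; omega)]
      obtain ⟨q, r, hqr⟩ := List.exists_cons_of_ne_nil (splitD_ne_nil rest)
      rw [splitD_cons_other hc, hqr]
      simp [List.modifyHead]

theorem splitOn_eq (cs : List Char) : PySem.Chars.splitOn cs ['-'] = splitD cs := by
  unfold PySem.Chars.splitOn
  rw [splitOn_go_eq cs.length.succ cs [] [] (by omega)]
  obtain ⟨q, r, hqr⟩ := List.exists_cons_of_ne_nil (splitD_ne_nil cs)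
  simp [hqr, List.modifyHead]

theorem replace_go_eq (c : Char) (new : List Char) (fuel : Nat) (l acc : List Char)
    (h : l.length ≤ fuel) :
    PySem.Chars.replace.go [c] new fuel l acc
      = acc.reverse ++ l.flatMap (fun x => if x = c then new else [x]) := by
  match fuel, l with
  | 0, l =>
    have : l = [] := List.length_eq_zero_iff.mp (by omega)
    subst this
    simp [PySem.Chars.replace.go]
  | fuel + 1, [] => simp [PySem.Chars.replace.go]
  | fuel + 1, x :: t =>
    rw [PySem.Chars.replace.go]
    by_cases hx : x = c
    · rw [if_pos (by simp [List.isPrefixOf, hx])]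
      rw [show List.drop [c].length (x :: t) = t from rfl]
      rw [replace_go_eq c new fuel t (new.reverse ++ acc) (by simp at h ⊢; omega)]
      simp [hx]
    · rw [if_neg (by simp [List.isPrefixOf]; exact fun h' => hx h'.symm)]
      rw [replace_go_eq c new fuel t (x :: acc) (by simp at h ⊢; omega)]
      simp [hx]

theorem replace_single (l : List Char) (c : Char) (new : List Char) :
    PySem.Chars.replace l [c] new = l.flatMap (fun x => if x = c then new else [x]) := by
  unfold PySem.Chars.replace
  rw [if_neg (by simp)]
  rw [replace_go_eq c new l.length l [] le_rfl]
  simp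

theorem spaceOthers_eq (p : List Char) : pvSpaceOthers p = p.flatMap gOth := by
  simp only [pvSpaceOthers, List.foldl_cons, List.foldl_nil, replace_single,
    List.flatMap_assoc]
  congr 1
  funext x
  simp only [gOth]
  by_cases h1 : x = '+' <;> by_cases h2 : x = '*' <;> by_cases h3 : x = '/' <;>
    by_cases h4 : x = '^' <;> simp [h1, h2, h3, h4]

theorem pvSpaced_eq_gOth (prev : Option Char) (c : Char) (hc : c ≠ '-') :
    pvSpaced prev c = gOth c := by
  simp only [pvSpaced, gOth]
  by_cases h1 : c = '+' <;> by_cases h2 : c = '*' <;> by_cases h3 : c = '/' <;>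
    by_cases h4 : c = '^' <;> simp [h1, h2, h3, h4, hc]

def pvCtx (prev : Option Char) (p0 : List Char) : Option Char :=
  match p0.getLast? with
  | none => prev
  | some c => some c

def bAssemble (parts : List (List Char)) : List Char :=
  pvSpaceOthers parts.head!
    ++ (parts.zip ((parts.drop 1).map pvSpaceOthers)).flatMap
        (fun pc => pvMinusTok pc.1 ++ pc.2)

theorem bAssemble_cons (p q : List Char) (r : List (List Char)) :
    bAssemble (p :: q :: r) = pvSpaceOthers p ++ (pvMinusTok p ++ bAssemble (q :: r)) := by
  simp [bAssemble, List.head!, List.zip, List.append_assoc]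

theorem spaceOthers_nil : pvSpaceOthers [] = [] := by
  simp [spaceOthers_eq]

theorem minusTok_eq (p0 : List Char) (prev : Option Char)
    (hmem : '-' ∉ p0) (h0 : p0 = [] → pvUnaryCtx prev = true) :
    pvMinusTok p0 = pvSpaced (pvCtx prev p0) '-' := by
  cases p0 using List.reverseRecOn with
  | nil => simp [pvMinusTok, pvSpaced, pvCtx, h0 rfl]
  | append_singleton q lc _ =>
    have hlc : lc ≠ '-' := by intro h; exact hmem (by simp [h])
    have hg : (q ++ [lc]).getLast? = some lc := by simp
    have hctx : pvCtx prev (q ++ [lc]) = some lc := by simp [pvCtx, hg]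
    rw [hctx]
    by_cases hm : lc ∈ (['+', '*', '/', '^', '(', ' '] : List Char) <;>
      simp [pvMinusTok, hg, hm, pvSpaced, pvUnaryCtx, hlc] <;>
      (simp at hm; tauto)

theorem bAssemble_main (cs p0 : List Char) (prev : Option Char)
    (hmem : '-' ∉ p0) (h0 : p0 = [] → pvUnaryCtx prev = true) :
    bAssemble ((splitD cs).modifyHead (p0 ++ ·))
      = pvSpaceOthers p0 ++ pvS (pvCtx prev p0) cs := by
  match cs with
  | [] => simp [splitD, List.modifyHead, bAssemble, List.head!, pvS]
  | c :: rest =>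
    by_cases hc : c = '-'
    · subst hc
      obtain ⟨q, r, hqr⟩ := List.exists_cons_of_ne_nil (splitD_ne_nil rest)
      have ih := bAssemble_main rest [] (some '-') (by simp)
        (fun _ => by simp [pvUnaryCtx])
      rw [modifyHead_nil_append, hqr, spaceOthers_nil, List.nil_append] at ih
      have hctx : pvCtx (some '-') ([] : List Char) = some '-' := rfl
      rw [hctx] at ih
      rw [splitD_cons_minus, hqr]
      simp only [List.modifyHead, List.append_nil]
      rw [bAssemble_cons, ih, pvS, ← minusTok_eq p0 prev hmem h0]
    · obtain ⟨q, r, hqr⟩ := List.exists_cons_of_ne_nil (splitD_ne_nil rest)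
      have ih := bAssemble_main rest (p0 ++ [c]) prev
        (by simp [hmem]; exact fun h => hc h.symm) (by simp)
      have hcomp : ((splitD rest).modifyHead (c :: ·)).modifyHead (p0 ++ ·)
          = (splitD rest).modifyHead ((p0 ++ [c]) ++ ·) := by
        rw [hqr]; simp [List.modifyHead]
      rw [splitD_cons_other hc, hcomp, ih]
      have hctx : pvCtx prev (p0 ++ [c]) = some c := by
        simp [pvCtx]
      rw [hctx]
      rw [pvS, spaceOthers_eq, spaceOthers_eq, List.flatMap_append]
      rw [pvSpaced_eq_gOth (pvCtx prev p0) c hc]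
      simp [gOth, List.append_assoc]

theorem join_nil_flatten (l : List (List Char)) :
    PySem.Chars.join [] l = l.flatten := by
  match l with
  | [] => simp [PySem.Chars.join_nil]
  | [p] => simp [PySem.Chars.join_singleton]
  | p :: q :: r =>
    rw [PySem.Chars.join_cons_cons, join_nil_flatten (q :: r)]
    simp

theorem flatten_flatMap_pair {α : Type} (l : List α) (f g : α → List Char) :
    (l.flatMap (fun x => [f x, g x])).flatten = l.flatMap (fun x => f x ++ g x) := by
  induction l with
  | nil => simp
  | cons x t ih => simp [ih]

theorem alt_eq (expr : String) :
    separate_with_spaces_alt expr = String.ofList (pvS none expr.toList) := by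
  unfold separate_with_spaces_alt
  dsimp only
  rw [PySem.List.foldl_append_eq_flatMap]
  rw [splitOn_eq]
  have hmain := bAssemble_main expr.toList [] none (by simp) (fun _ => rfl)
  rw [modifyHead_nil_append, spaceOthers_nil, List.nil_append] at hmain
  have hctx : pvCtx none ([] : List Char) = none := rfl
  rw [hctx] at hmain
  rw [← hmain]
  congr 1
  rw [join_nil_flatten]
  simp only [List.singleton_append, List.flatten_cons]
  rw [flatten_flatMap_pair]
  obtain ⟨q, r, hqr⟩ := List.exists_cons_of_ne_nil (splitD_ne_nil expr.toList)
  simp [bAssemble, hqr, List.head!]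

-- A-side: the loop equals the zipped per-character form, which equals pvS
theorem sepALoop_eq (cs : List Char) (i : Nat) (result : List Char) : sepALoop cs i result =
    result ++ ((((none :: cs.map some).zip cs).drop i).map (fun pc => pvSpaced pc.1 pc.2)).flatten := by
  rw [sepALoop]
  by_cases h : i < cs.length
  · have hz : i < ((none :: cs.map some).zip cs).length := by simp; omega
    rw [dif_pos h, sepALoop_eq cs (i + 1)]
    rw [List.drop_eq_getElem_cons hz]
    have hget : ((none :: cs.map some).zip cs)[i] = ((none :: cs.map some)[i]'(by simp; omega), cs[i]) := by
      simp [List.getElem_zip]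
    rw [hget]
    have hlt : i - 1 < cs.length := by omega
    have hprev : (none :: cs.map some)[i]'(by simp; omega) =
        if i = 0 then none else some (cs[i-1]'hlt) := by
      rcases i with _ | j
      · simp
      · simp
    rw [hprev]
    by_cases h0 : i = 0
    · rw [if_pos h0]
      by_cases hop : cs[i] ∈ pvOpsA
      · by_cases hm : cs[i] = '-'
        · rw [if_pos hop, if_pos hm, if_pos (Or.inl h0)]
          simp [pvSpaced, pvUnaryCtx, hm]
        · rw [if_pos hop, if_neg hm]
          have hop' : cs[i] = '+' ∨ cs[i] = '-' ∨ cs[i] = '*' ∨ cs[i] = '/' ∨ cs[i] = '^' := by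
            simpa [pvOpsA] using hop
          rcases hop' with h1|h1|h1|h1|h1 <;> first | (exact absurd h1 hm) | simp [pvSpaced, h1]
      · rw [if_neg hop]
        have hop' : ¬(cs[i] = '+' ∨ cs[i] = '-' ∨ cs[i] = '*' ∨ cs[i] = '/' ∨ cs[i] = '^') := by
          simpa [pvOpsA] using hop
        simp [pvSpaced, hop']
    · rw [if_neg h0]
      have hbang : cs[i-1]! = cs[i-1]'hlt := getElem!_pos cs (i-1) hlt
      by_cases hop : cs[i] ∈ pvOpsA
      · by_cases hm : cs[i] = '-'
        · rw [if_pos hop, if_pos hm]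
          by_cases hu : cs[i-1]'hlt ∈ pvOpsA ++ ['(', ' ']
          · rw [if_pos (Or.inr (hbang ▸ hu))]
            have hctx : pvUnaryCtx (some (cs[i-1]'hlt)) = true := by
              simp [pvUnaryCtx, pvOpsA] at hu ⊢; tauto
            simp [pvSpaced, hm, hctx]
          · rw [if_neg (by rw [hbang]; tauto)]
            have hctx : pvUnaryCtx (some (cs[i-1]'hlt)) = false := by
              simp [pvUnaryCtx, pvOpsA] at hu ⊢; tauto
            simp [pvSpaced, hm, hctx]
        · rw [if_pos hop, if_neg hm]
          have hop' : cs[i] = '+' ∨ cs[i] = '-' ∨ cs[i] = '*' ∨ cs[i] = '/' ∨ cs[i] = '^' := by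
            simpa [pvOpsA] using hop
          rcases hop' with h1|h1|h1|h1|h1 <;> first | (exact absurd h1 hm) | simp [pvSpaced, h1]
      · rw [if_neg hop]
        have hop' : ¬(cs[i] = '+' ∨ cs[i] = '-' ∨ cs[i] = '*' ∨ cs[i] = '/' ∨ cs[i] = '^') := by
          simpa [pvOpsA] using hop
        simp [pvSpaced, hop']
  · rw [dif_neg h]
    rw [List.drop_of_length_le (by simp; omega)]
    simp
termination_by cs.length - i

theorem zip_form_eq_pvS (cs : List Char) (prev : Option Char) :
    (((prev :: cs.map some).zip cs).map (fun pc => pvSpaced pc.1 pc.2)).flatten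
      = pvS prev cs := by
  induction cs generalizing prev with
  | nil => simp [pvS]
  | cons c rest ih =>
    have h2 := ih (some c)
    simp only [List.zip, List.map_zipWith] at h2
    simp [pvS, List.zip, List.map_zipWith, h2]

-- ===== VERDICT (by name: the statement is the Claim_ definition above) =====
theorem separate_with_spaces_spec : Claim_equal_separate_with_spaces := by
  intro expr _
  show _ = _
  rw [alt_eq, separate_with_spaces, sepALoop_eq]
  simp [zip_form_eq_pvS]
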